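-- pv_equiv track=rewrite | github.com/jazehin/python | rubikcube/rubikcube.py | PerformChange
-- ===== SOURCE A (Python) =====
-- def PerformChange(rubik, change):
--     # 1st char: F = row, C = column
--     # 2nd char: number of row/column
--     # 3rd char: + = right/down, - = left/up
--     n = len(rubik)
--     i = int(change[1]) - 1
--
--     if (change[0] == 'F'):
--         if (change[2] == '+'):
--             tmp = rubik[i].pop(n - 1)
--             rubik[i].insert(0, tmp)
--         elif (change[2] == '-'):
--             tmp = rubik[i].pop(0)
--             rubik[i].append(tmp)
--     else:
--         if (change[2] == '+'):
--             array = []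
--             j = 0
--             while (j < n):
--                 array.append(rubik[j][i])
--                 j = j + 1
--
--             tmp = array.pop(n - 1)
--             array.insert(0, tmp)
--
--             j = 0
--             while (j < n):
--                 rubik[j][i] = array[j]
--                 j = j + 1
--
--         elif (change[2] == '-'):
--             array = []
--             j = 0
--             while (j < n):
--                 array.append(rubik[j][i])
--                 j = j + 1
--
--             tmp = array.pop(0)
--             array.append(tmp)
--
--             j = 0
--             while (j < n):
--                 rubik[j][i] = array[j]
--                 j = j + 1
--
--     return rubik
--
-- i = 0
-- ===== SOURCE B (Python) =====
-- def PerformChange(rubik, change):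
--     # Same return value as A on square grids; mutates rubik's inner lists in place like A.
--     n = len(rubik)
--     i = int(change[1]) - 1
--     d = change[2]
--     if d != '+' and d != '-':
--         return rubik
--     if change[0] == 'F':
--         coords = [(i, c) for c in range(n)]
--     else:
--         coords = [(r, i) for r in range(n)]
--     vals = [rubik[r][c] for (r, c) in coords]
--     vals = vals[-1:] + vals[:-1] if d == '+' else vals[1:] + vals[:1]
--     for (r, c), v in zip(coords, vals):
--         rubik[r][c] = v
--     return rubik
-- ===== Notes on version B (the rewrite author's own statement) =====
-- stated objective: simpler
-- what changed: A's four asymmetric branches (in-place pop/insert on the row vs. an explicit read-loop/rotate/write-loop for the column) are unified into one extract/rotate/write-back pass over a coordinate list, with the rotation done by slicing.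
-- outside the precondition, e.g. on PerformChange([[1, 2, 3]], 'F1-'): A returns [[2, 3, 1]], B returns [[1, 2, 3]]
import Mathlib
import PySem

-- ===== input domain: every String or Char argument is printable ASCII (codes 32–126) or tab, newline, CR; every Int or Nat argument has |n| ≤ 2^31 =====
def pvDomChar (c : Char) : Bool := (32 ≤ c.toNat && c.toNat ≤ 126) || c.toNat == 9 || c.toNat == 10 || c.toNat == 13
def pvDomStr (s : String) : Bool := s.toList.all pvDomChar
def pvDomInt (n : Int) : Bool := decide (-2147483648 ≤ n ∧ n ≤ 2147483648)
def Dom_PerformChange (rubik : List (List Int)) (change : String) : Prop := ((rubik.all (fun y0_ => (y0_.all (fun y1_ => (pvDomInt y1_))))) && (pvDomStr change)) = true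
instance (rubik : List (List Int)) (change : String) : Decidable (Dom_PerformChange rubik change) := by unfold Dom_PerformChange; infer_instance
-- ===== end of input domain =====

-- B replaces A's four asymmetric branches by one extract/rotate/write-back pass over a coordinate
-- list (rotation by slicing); equivalence is about the RETURN value (both Pythons also mutate the
-- grid's inner lists in place in the same way on Pre_).

-- ===== PORT A =====
-- int(change[1]) on the 1-char string change[1] is PySem.Int.ofChars? [c].
def PerformChange (rubik : List (List Int)) (change : String) : List (List Int) :=
  let n : Int := PySem.List.len rubik
  match (PySem.Str.pyGet? change 1).bind (fun c => PySem.Int.ofChars? [c]) with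
  | none => rubik  -- IndexError / ValueError: excluded by Pre_
  | some dv =>
    let i : Int := dv - 1
    if PySem.Str.pyGet? change 0 = some 'F' then
      if PySem.Str.pyGet? change 2 = some '+' then
        match PySem.List.pyGet? rubik i with
        | none => rubik  -- IndexError: excluded by Pre_
        | some row =>
          match PySem.List.pop? row (n - 1) with
          | none => rubik  -- IndexError: excluded by Pre_
          | some tr => PySem.List.pySetD rubik i (PySem.List.insert tr.2 0 tr.1)
      else if PySem.Str.pyGet? change 2 = some '-' then
        match PySem.List.pyGet? rubik i with
        | none => rubik
        | some tr0 =>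
          match PySem.List.pop? tr0 0 with
          | none => rubik
          | some tr => PySem.List.pySetD rubik i (tr.2 ++ [tr.1])
      else rubik
    else
      if PySem.Str.pyGet? change 2 = some '+' then
        let array := (PySem.List.pyRange 0 n 1).foldl
          (fun arr j => arr ++ [PySem.List.pyGetD (PySem.List.pyGetD rubik j []) i 0]) []
        match PySem.List.pop? array (n - 1) with
        | none => rubik
        | some tr =>
          let array2 := PySem.List.insert tr.2 0 tr.1
          (PySem.List.pyRange 0 n 1).foldl
            (fun acc j => PySem.List.pySetD acc j
              (PySem.List.pySetD (PySem.List.pyGetD acc j []) i (PySem.List.pyGetD array2 j 0))) rubik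
      else if PySem.Str.pyGet? change 2 = some '-' then
        let array := (PySem.List.pyRange 0 n 1).foldl
          (fun arr j => arr ++ [PySem.List.pyGetD (PySem.List.pyGetD rubik j []) i 0]) []
        match PySem.List.pop? array 0 with
        | none => rubik
        | some tr =>
          let array2 := tr.2 ++ [tr.1]
          (PySem.List.pyRange 0 n 1).foldl
            (fun acc j => PySem.List.pySetD acc j
              (PySem.List.pySetD (PySem.List.pyGetD acc j []) i (PySem.List.pyGetD array2 j 0))) rubik
      else rubik

-- ===== PORT B =====
def PerformChange_alt (rubik : List (List Int)) (change : String) : List (List Int) :=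
  let n : Int := PySem.List.len rubik
  match (PySem.Str.pyGet? change 1).bind (fun c => PySem.Int.ofChars? [c]) with
  | none => rubik  -- IndexError / ValueError: excluded by Pre_
  | some dv =>
    let i : Int := dv - 1
    match PySem.Str.pyGet? change 2 with
    | none => rubik  -- IndexError: excluded by Pre_
    | some d =>
      if d ≠ '+' ∧ d ≠ '-' then rubik
      else
        let coords : List (Int × Int) :=
          if PySem.Str.pyGet? change 0 = some 'F'
          then (PySem.List.pyRange 0 n 1).map (fun c => (i, c))
          else (PySem.List.pyRange 0 n 1).map (fun r => (r, i))
        let vals := coords.map (fun rc => PySem.List.pyGetD (PySem.List.pyGetD rubik rc.1 []) rc.2 0)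
        let vals2 := if d = '+'
          then PySem.List.slice vals (some (-1)) none ++ PySem.List.slice vals none (some (-1))
          else PySem.List.slice vals (some 1) none ++ PySem.List.slice vals none (some 1)
        (coords.zip vals2).foldl
          (fun acc p => PySem.List.pySetD acc p.1.1
            (PySem.List.pySetD (PySem.List.pyGetD acc p.1.1 []) p.1.2 p.2)) rubik

-- ===== PRECONDITION & SPEC =====
-- Pre_ excludes the inputs on which A raises (change shorter than 3 chars, a non-digit line
-- number, a '+'/'-' change on an empty grid, a row change whose row index is ≥ n, a column
-- change whose column index falls outside some row) and 'F' changes aimed at a row whose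
-- length differs from the grid's row count, on which A's use of the row count as that row's
-- length is accidental.
def Pre_PerformChange (rubik : List (List Int)) (change : String) : Prop :=
  3 ≤ change.toList.length ∧
  (change.toList[1]?.map Char.isDigit).getD false = true ∧
  ((change.toList[2]? = some '+' ∨ change.toList[2]? = some '-') →
    rubik ≠ [] ∧
    (change.toList[0]? = some 'F' →
      (change.toList[1]?.map (fun c => (c.toNat : Int) - 48)).getD 0 - 1 < (rubik.length : Int) ∧
      (rubik.getD ((PySem.List.pyIdx? rubik.length
          ((change.toList[1]?.map (fun c => (c.toNat : Int) - 48)).getD 0 - 1)).getD 0) []).length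
        = rubik.length) ∧
    (¬ (change.toList[0]? = some 'F') →
      ∀ row ∈ rubik, PySem.Raise.InRange row.length
        ((change.toList[1]?.map (fun c => (c.toNat : Int) - 48)).getD 0 - 1)))
instance (rubik : List (List Int)) (change : String) : Decidable (Pre_PerformChange rubik change) := by
  unfold Pre_PerformChange; infer_instance

def pvWitness_PerformChange : List (List Int) × String := ([[1, 2], [3, 4]], "F1+")

def Spec_PerformChange (rubik : List (List Int)) (change : String) (out : List (List Int)) : Prop := out = PerformChange_alt rubik change
instance (rubik : List (List Int)) (change : String) (out : List (List Int)) : Decidable (Spec_PerformChange rubik change out) := by unfold Spec_PerformChange; infer_instance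

-- ===== CLAIM (what is proved, stated in full; the proofs are below) =====
def Claim_equal_PerformChange : Prop := ∀ (rubik : List (List Int)) (change : String), Dom_PerformChange rubik change → Pre_PerformChange rubik change → Spec_PerformChange rubik change (PerformChange rubik change)

-- ===== LEMMAS AND PROOFS =====

-- int(c) of a single ASCII digit character
theorem pvDigitVal (c : Char) (h : c.isDigit = true) :
    PySem.Int.ofChars? [c] = some ((c.toNat : Int) - 48) := by
  have h' : 48 ≤ c.toNat ∧ c.toNat ≤ 57 := by
    simp only [Char.isDigit, Bool.and_eq_true, decide_eq_true_eq] at h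
    exact ⟨h.1, h.2⟩
  have hc : c = Char.ofNat c.toNat := (Char.ofNat_toNat c).symm
  obtain ⟨h1, h2⟩ := h'
  set n := c.toNat with hn
  interval_cases n <;> (rw [hc]; decide)

theorem pvDigitBounds (c : Char) (h : c.isDigit = true) :
    (0 : Int) ≤ (c.toNat : Int) - 48 ∧ (c.toNat : Int) - 48 ≤ 9 := by
  have h' : 48 ≤ c.toNat ∧ c.toNat ≤ 57 := by
    simp only [Char.isDigit, Bool.and_eq_true, decide_eq_true_eq] at h
    exact ⟨h.1, h.2⟩
  omega

-- a Python index in range normalises to one Nat position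
theorem pvIdxSpec (n : Nat) (i : Int) (h1 : -(n : Int) ≤ i) (h2 : i < n) :
    ∃ k, PySem.List.pyIdx? n i = some k ∧ k < n := by
  unfold PySem.List.pyIdx?
  split_ifs
  all_goals first
    | exact ⟨i.toNat, rfl, by omega⟩
    | exact ⟨n - (-i).toNat, rfl, by omega⟩

theorem pvGetAt {α : Type} (xs : List α) (i : Int) (k : Nat)
    (hk : PySem.List.pyIdx? xs.length i = some k) (d : α) :
    PySem.List.pyGetD xs i d = xs.getD k d := by
  simp [PySem.List.pyGetD, PySem.List.pyGet?, hk, List.getD]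

theorem pvSetAt {α : Type} (xs : List α) (i : Int) (k : Nat)
    (hk : PySem.List.pyIdx? xs.length i = some k) (v : α) :
    PySem.List.pySetD xs i v = xs.set k v := by
  simp [PySem.List.pySetD, PySem.List.pySet?, hk]

-- enumerate is zip with the index range
theorem pvEnumZip {α : Type} (xs : List α) (s : Int) :
    PySem.List.enumerate xs s = (PySem.List.pyRange s (s + xs.length) 1).zip xs := by
  induction xs generalizing s with
  | nil => simp [PySem.List.enumerate_nil, PySem.List.pyRange_one_eq_nil]
  | cons x xs ih =>
      have hb : s + (((x :: xs) : List α).length : Int) = (s + 1) + (xs.length : Int) := by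
        simp [List.length_cons]; ring
      rw [PySem.List.enumerate_cons, hb, PySem.List.pyRange_one_cons (by omega)]
      rw [List.zip_cons_cons, ih (s + 1)]

-- writing every position of a row in order replaces its tail
theorem pvWriteRow (vals : List Int) : ∀ (a : Nat) (row : List Int),
    row.length = a + vals.length →
    ((PySem.List.pyRange (a : Int) ((a : Int) + (vals.length : Int)) 1).zip vals).foldl
      (fun r p => PySem.List.pySetD r p.1 p.2) row = row.take a ++ vals := by
  induction vals with
  | nil =>
      intro a row h
      rw [show ((a : Int) + (([] : List Int).length : Int)) = (a : Int) by simp]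
      rw [PySem.List.pyRange_one_eq_nil (le_refl _)]
      have hle : row.length ≤ a := by simpa using h.le
      simp [List.take_of_length_le hle]
  | cons v vs ih =>
      intro a row h
      have hb : (a : Int) + (((v :: vs) : List Int).length : Int)
          = ((a + 1 : Nat) : Int) + ((vs : List Int).length : Int) := by
        simp [List.length_cons]; ring
      rw [hb, PySem.List.pyRange_one_cons (by push_cast; omega)]
      rw [show ((a : Int) + 1) = ((a + 1 : Nat) : Int) by push_cast; ring]
      rw [List.zip_cons_cons, List.foldl_cons]
      have hset : PySem.List.pySetD row (a : Int) v = row.set a v := by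
        simp [PySem.List.pySetD_natCast]
      rw [hset, ih (a + 1) (row.set a v) (by simp [List.length_cons] at h ⊢; omega)]
      have hlt : a < row.length := by simp [List.length_cons] at h; omega
      rw [List.set_eq_take_append_cons_drop, if_pos hlt]
      rw [List.take_append]
      simp [List.length_take, Nat.min_eq_left (by omega : a ≤ row.length)]

-- the whole row-update fold factors through one pySetD
theorem pvRowFold (zs : List (Int × Int)) : ∀ (g : List (List Int)) (i : Int) (k : Nat),
    PySem.List.pyIdx? g.length i = some k → k < g.length →
    zs.foldl (fun acc p => PySem.List.pySetD acc i
        (PySem.List.pySetD (PySem.List.pyGetD acc i []) p.1 p.2)) g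
    = PySem.List.pySetD g i (zs.foldl (fun row p => PySem.List.pySetD row p.1 p.2)
        (PySem.List.pyGetD g i [])) := by
  induction zs with
  | nil =>
      intro g i k hk hlt
      simp only [List.foldl_nil]
      rw [pvGetAt g i k hk, pvSetAt g i k hk]
      rw [List.getD_eq_getElem _ _ hlt]
      exact (List.set_getElem_self hlt).symm

  | cons p zs ih =>
      intro g i k hk hlt
      simp only [List.foldl_cons]
      set r1 := PySem.List.pySetD (PySem.List.pyGetD g i []) p.1 p.2 with hr1
      set g1 := PySem.List.pySetD g i r1 with hg1
      have hgs : g1 = g.set k r1 := by rw [hg1, pvSetAt g i k hk]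
      have hlen : g1.length = g.length := by rw [hgs]; simp
      have hk1 : PySem.List.pyIdx? g1.length i = some k := by rw [hlen]; exact hk
      rw [ih g1 i k hk1 (by omega)]
      rw [pvGetAt g1 i k hk1, pvSetAt g1 i k hk1, hgs]
      rw [List.getD_eq_getElem _ _ (by simpa using hlt), List.getElem_set_self]
      rw [List.set_set]
      rw [pvSetAt g i k hk]

-- the two one-step right rotations: A's pop(n-1)/insert(0) and B's l[-1:]+l[:-1]
theorem pvRotPlus (l : List Int) (h : l ≠ []) :
    PySem.List.slice l (some (-1)) none ++ PySem.List.slice l none (some (-1))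
      = l.getLast h :: l.dropLast := by
  rw [PySem.List.slice_from_neg_one, PySem.List.slice_to_neg_one, List.drop_length_sub_one h]
  rfl

theorem pvPopLast (l : List Int) (h : l ≠ []) :
    PySem.List.pop? l ((l.length : Int) - 1) = some (l.getLast h, l.dropLast) := by
  have hlen : 1 ≤ l.length := List.length_pos_of_ne_nil h
  rw [show ((l.length : Int) - 1) = ((l.length - 1 : Nat) : Int) by omega]
  rw [PySem.List.pop?_natCast l (l.length - 1) (by omega)]
  rw [List.eraseIdx_length_sub_one, List.getLast_eq_getElem h]

-- A's indexed write-back loop is B's fold over the zipped column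
theorem pvColBridge (ws : List Int) (rubik : List (List Int)) (i : Int) :
    (PySem.List.pyRange 0 (ws.length : Int) 1).foldl
      (fun acc j => PySem.List.pySetD acc j
        (PySem.List.pySetD (PySem.List.pyGetD acc j []) i (PySem.List.pyGetD ws j 0))) rubik
    = ((PySem.List.pyRange 0 (ws.length : Int) 1).zip ws).foldl
      (fun acc q => PySem.List.pySetD acc q.1
        (PySem.List.pySetD (PySem.List.pyGetD acc q.1 []) i q.2)) rubik := by
  have h2 := pvEnumZip ws 0
  rw [zero_add] at h2
  have h1 := PySem.List.enumerate_eq_map_pyRange ws 0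
  rw [PySem.List.len_eq] at h1
  rw [← h2, h1, List.foldl_map]

theorem pvWriteRow0 (vals row : List Int) (h : row.length = vals.length) :
    ((PySem.List.pyRange 0 (vals.length : Int) 1).zip vals).foldl
      (fun r p => PySem.List.pySetD r p.1 p.2) row = vals := by
  have h0 := pvWriteRow vals 0 row (by omega)
  simpa using h0

-- ===== VERDICT (by name: the statement is the Claim_ definition above) =====
theorem PerformChange_spec : Claim_equal_PerformChange := by
  unfold Claim_equal_PerformChange
  intro rubik change hdom hpre
  unfold Spec_PerformChange
  obtain ⟨hlen, hdig, hpm⟩ := hpre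
  obtain ⟨c0, c1, c2, rest, hcs⟩ : ∃ c0 c1 c2 rest, change.toList = c0 :: c1 :: c2 :: rest := by
    match hx : change.toList with
    | c0 :: c1 :: c2 :: rest => exact ⟨c0, c1, c2, rest, rfl⟩
    | [] => rw [hx] at hlen; simp at hlen
    | [a] => rw [hx] at hlen; simp at hlen
    | [a, b] => rw [hx] at hlen; simp at hlen
  have hget0 : PySem.Str.pyGet? change 0 = some c0 := by
    simp only [PySem.Str.pyGet?_eq, PySem.Chars.pyGet?_eq_listPyGet?]
    rw [hcs, show (0:Int) = ((0:Nat):Int) by norm_num, PySem.List.pyGet?_natCast]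
    simp
  have hget1 : PySem.Str.pyGet? change 1 = some c1 := by
    simp only [PySem.Str.pyGet?_eq, PySem.Chars.pyGet?_eq_listPyGet?]
    rw [hcs, show (1:Int) = ((1:Nat):Int) by norm_num, PySem.List.pyGet?_natCast]
    simp
  have hget2 : PySem.Str.pyGet? change 2 = some c2 := by
    simp only [PySem.Str.pyGet?_eq, PySem.Chars.pyGet?_eq_listPyGet?]
    rw [hcs, show (2:Int) = ((2:Nat):Int) by norm_num, PySem.List.pyGet?_natCast]
    simp
  have hdig1 : c1.isDigit = true := by
    rw [hcs] at hdig; simpa using hdig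
  have hdvb : (PySem.Str.pyGet? change 1).bind (fun c => PySem.Int.ofChars? [c])
      = some ((c1.toNat : Int) - 48) := by
    rw [hget1]; simp [pvDigitVal c1 hdig1]
  have hdvB := pvDigitBounds c1 hdig1
  by_cases hc2 : c2 = '+' ∨ c2 = '-'
  · have hAll := hpm (by rw [hcs]; rcases hc2 with h | h <;> simp [h])
    have hne := hAll.1
    have hnpos : 1 ≤ rubik.length := List.length_pos_of_ne_nil hne
    by_cases hc0 : c0 = 'F'
    · -- row case
      rcases hc2 with hc2' | hc2'
      · -- row, '+'
        subst hc0 hc2'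
        have hub : (c1.toNat : Int) - 48 - 1 < (rubik.length : Int) := by
          have h := (hAll.2.1 (by rw [hcs]; simp)).1
          rw [hcs] at h; simpa using h
        have hlo : -(rubik.length : Int) ≤ (c1.toNat : Int) - 48 - 1 := by omega
        obtain ⟨k, hk, hklt⟩ := pvIdxSpec rubik.length ((c1.toNat : Int) - 48 - 1) hlo hub
        have hget : PySem.List.pyGet? rubik ((c1.toNat : Int) - 48 - 1) = some rubik[k] := by
          simp [PySem.List.pyGet?, hk, List.getElem?_eq_getElem hklt]
        have hgetD : PySem.List.pyGetD rubik ((c1.toNat : Int) - 48 - 1) [] = rubik[k] := by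
          simp [PySem.List.pyGetD, hget]
        have hrlen : rubik[k].length = rubik.length := by
          have h := (hAll.2.1 (by rw [hcs]; simp)).2
          rw [hcs] at h
          simp at h
          rw [hk] at h
          simpa [List.getElem?_eq_getElem hklt] using h
        have hrne : rubik[k] ≠ [] := by
          intro h; rw [h] at hrlen; simp at hrlen; omega
        have hpop := pvPopLast rubik[k] hrne
        rw [hrlen] at hpop
        have hv2len : (rubik[k].getLast hrne :: rubik[k].dropLast).length = rubik.length := by
          simp [List.length_dropLast]; omega
        simp only [PerformChange, PerformChange_alt, hdvb, hget0, hget2, PySem.List.len_eq, hget,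
          if_true, hpop, PySem.List.insert_zero, List.map_map]
        rw [show ((rubik.length : Int)) = ((rubik[k].length : Int)) by rw [hrlen]]
        rw [if_neg (by simp : ¬ ('+' ≠ '+' ∧ '+' ≠ '-'))]
        simp only [Function.comp_def, hgetD]
        rw [PySem.List.map_pyGetD_pyRange_zero' rubik[k] 0]
        rw [pvRotPlus rubik[k] hrne]
        rw [List.zip_map_left, List.foldl_map]
        simp only [Prod.map, id]
        rw [pvRowFold _ rubik _ k hk hklt, hgetD]
        rw [show ((rubik[k].length : Int)) = (((rubik[k].getLast hrne :: rubik[k].dropLast).length : Int)) by rw [hv2len, hrlen]]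
        rw [pvWriteRow0 _ rubik[k] (by rw [hv2len, hrlen])]
      · -- row, '-'
        subst hc0 hc2'
        have hub : (c1.toNat : Int) - 48 - 1 < (rubik.length : Int) := by
          have h := (hAll.2.1 (by rw [hcs]; simp)).1
          rw [hcs] at h; simpa using h
        have hlo : -(rubik.length : Int) ≤ (c1.toNat : Int) - 48 - 1 := by omega
        obtain ⟨k, hk, hklt⟩ := pvIdxSpec rubik.length ((c1.toNat : Int) - 48 - 1) hlo hub
        have hget : PySem.List.pyGet? rubik ((c1.toNat : Int) - 48 - 1) = some rubik[k] := by
          simp [PySem.List.pyGet?, hk, List.getElem?_eq_getElem hklt]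
        have hgetD : PySem.List.pyGetD rubik ((c1.toNat : Int) - 48 - 1) [] = rubik[k] := by
          simp [PySem.List.pyGetD, hget]
        have hrlen : rubik[k].length = rubik.length := by
          have h := (hAll.2.1 (by rw [hcs]; simp)).2
          rw [hcs] at h
          simp at h
          rw [hk] at h
          simpa [List.getElem?_eq_getElem hklt] using h
        have hrne : rubik[k] ≠ [] := by
          intro h; rw [h] at hrlen; simp at hrlen; omega
        obtain ⟨x, xs, hxx⟩ := List.exists_cons_of_ne_nil hrne
        have hpop : PySem.List.pop? rubik[k] 0 = some (x, xs) := by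
          rw [hxx]; exact PySem.List.pop?_zero_cons x xs
        have hv2 : PySem.List.slice rubik[k] (some 1) none ++ PySem.List.slice rubik[k] none (some 1) = xs ++ [x] := by
          rw [hxx, PySem.List.slice_from (x :: xs) (a := 1) (by norm_num),
            PySem.List.slice_to (x :: xs) (b := 1) (by norm_num)]
          rfl
        have hv2len : (xs ++ [x]).length = rubik.length := by
          rw [hxx] at hrlen
          simp only [List.length_append, List.length_cons, List.length_nil] at hrlen ⊢
          omega
        simp only [PerformChange, PerformChange_alt, hdvb, hget0, hget2, PySem.List.len_eq, hget,
          hpop, reduceIte, List.map_map, Function.comp_def, hgetD]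
        rw [if_neg (by simp : ¬ (some '-' = some '+'))]
        rw [if_neg (by simp : ¬ ('-' ≠ '+' ∧ '-' ≠ '-'))]
        rw [if_neg (by simp : ¬ ('-' = '+'))]
        rw [show ((rubik.length : Int)) = ((rubik[k].length : Int)) by rw [hrlen]]
        rw [PySem.List.map_pyGetD_pyRange_zero' rubik[k] 0]
        rw [hv2]
        rw [List.zip_map_left, List.foldl_map]
        simp only [Prod.map, id]
        rw [pvRowFold _ rubik _ k hk hklt, hgetD]
        rw [show ((rubik[k].length : Int)) = (((xs ++ [x]).length : Int)) by rw [hv2len, hrlen]]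
        rw [pvWriteRow0 _ rubik[k] (by rw [hv2len, hrlen])]
    · -- column case
      rcases hc2 with hc2' | hc2'
      · -- column, '+'
        subst hc2'
        have hc0' : ¬ (some c0 = some 'F') := by simpa using hc0
        simp only [PerformChange, PerformChange_alt, hdvb, hget0, hget2, PySem.List.len_eq,
          reduceIte, PySem.List.foldl_append_singleton_eq_map, List.nil_append]
        rw [if_neg hc0', if_neg hc0']
        simp only [List.map_map, Function.comp_def]
        rw [if_neg (by simp : ¬ ('+' ≠ '+' ∧ '+' ≠ '-'))]
        set vs := (PySem.List.pyRange 0 (rubik.length : Int) 1).map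
          (fun j => PySem.List.pyGetD (PySem.List.pyGetD rubik j []) ((c1.toNat : Int) - 48 - 1) 0) with hvsdef
        have hvslen : vs.length = rubik.length := by
          simp [hvsdef, PySem.List.length_pyRange_one]
        have hvsne : vs ≠ [] := by
          intro h; rw [h] at hvslen; simp at hvslen; omega
        have hpop := pvPopLast vs hvsne
        rw [hvslen] at hpop
        simp only [hpop, PySem.List.insert_zero]
        rw [pvRotPlus vs hvsne]
        rw [List.zip_map_left, List.foldl_map]
        simp only [Prod.map, id]
        have hwslen : (vs.getLast hvsne :: vs.dropLast).length = rubik.length := by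
          simp [List.length_dropLast]; omega
        rw [show ((rubik.length : Int)) = (((vs.getLast hvsne :: vs.dropLast).length : Int)) by
          rw [hwslen]]
        rw [pvColBridge (vs.getLast hvsne :: vs.dropLast) rubik ((c1.toNat : Int) - 48 - 1)]
      · -- column, '-'
        subst hc2'
        have hc0' : ¬ (some c0 = some 'F') := by simpa using hc0
        simp only [PerformChange, PerformChange_alt, hdvb, hget0, hget2, PySem.List.len_eq,
          reduceIte, PySem.List.foldl_append_singleton_eq_map, List.nil_append]
        rw [if_neg hc0', if_neg hc0']
        rw [if_neg (by simp : ¬ (some '-' = some '+'))]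
        rw [if_neg (by simp : ¬ ('-' ≠ '+' ∧ '-' ≠ '-'))]
        rw [if_neg (by simp : ¬ ('-' = '+'))]
        simp only [List.map_map, Function.comp_def]
        set vs := (PySem.List.pyRange 0 (rubik.length : Int) 1).map
          (fun j => PySem.List.pyGetD (PySem.List.pyGetD rubik j []) ((c1.toNat : Int) - 48 - 1) 0) with hvsdef
        have hvslen : vs.length = rubik.length := by
          simp [hvsdef, PySem.List.length_pyRange_one]
        have hvsne : vs ≠ [] := by
          intro h; rw [h] at hvslen; simp at hvslen; omega
        obtain ⟨x, xs, hxx⟩ := List.exists_cons_of_ne_nil hvsne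
        have hpop : PySem.List.pop? vs 0 = some (x, xs) := by
          rw [hxx]; exact PySem.List.pop?_zero_cons x xs
        have hv2 : PySem.List.slice vs (some 1) none ++ PySem.List.slice vs none (some 1) = xs ++ [x] := by
          rw [hxx, PySem.List.slice_from (x :: xs) (a := 1) (by norm_num),
            PySem.List.slice_to (x :: xs) (b := 1) (by norm_num)]
          rfl
        simp only [hpop, hv2]
        rw [List.zip_map_left, List.foldl_map]
        simp only [Prod.map, id]
        have hwslen : (xs ++ [x]).length = rubik.length := by
          rw [hxx] at hvslen
          simp only [List.length_append, List.length_cons, List.length_nil] at hvslen ⊢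
          omega
        rw [show ((rubik.length : Int)) = (((xs ++ [x]).length : Int)) by rw [hwslen]]
        rw [pvColBridge (xs ++ [x]) rubik ((c1.toNat : Int) - 48 - 1)]
  · have hc2p : ¬ (c2 = '+') := fun h => hc2 (Or.inl h)
    have hc2m : ¬ (c2 = '-') := fun h => hc2 (Or.inr h)
    simp only [PerformChange, PerformChange_alt, hdvb, hget0, hget2]
    simp [hc2p, hc2m]
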